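-- pv_equiv track=rewrite | github.com/LegalDNA/jarvis | src/digest.py | build_markdown_digest
-- ===== SOURCE A (Python) =====
-- from typing import List, Dict, Optional
--
-- PRIORITY_ORDER = {"Critical": 0, "Time-Sensitive": 1, "FYI": 2}
--
-- def build_markdown_digest(items: List[Dict], note: str | None = None) -> str:
--     if not items and not note:
--         return "# Jarvis Brief\n\nNo new posts from tracked accounts in the last 24h."
--     lines = ["# Jarvis Brief\n"]
--     if note:
--         lines.append(f"> {note}\n")
--     for it in sorted(items, key=lambda x: (PRIORITY_ORDER.get(x.get("importance","FYI"), 3), x.get("account",""))):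
--         line = f"- @{it['account']} [{it['importance']}] {it['url']}"
--         if it.get("date_hint"):
--             line += f" (Date: {it['date_hint']})"
--         if it.get("time_hint"):
--             line += f" (Time: {it['time_hint']})"
--         lines.append(line)
--     return "\n".join(lines)
-- ===== SOURCE B (Python) =====
-- from typing import List, Dict, Optional
--
-- PRIORITY_ORDER = {"Critical": 0, "Time-Sensitive": 1, "FYI": 2}
--
-- def _fmt(it):
--     line = f"- @{it['account']} [{it['importance']}] {it['url']}"
--     if it.get("date_hint"):
--         line += f" (Date: {it['date_hint']})"
--     if it.get("time_hint"):
--         line += f" (Time: {it['time_hint']})"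
--     return line
--
-- def build_markdown_digest(items: List[Dict], note: str | None = None) -> str:
--     if not items and not note:
--         return "# Jarvis Brief\n\nNo new posts from tracked accounts in the last 24h."
--     buckets = ([], [], [], [])
--     for it in items:
--         buckets[PRIORITY_ORDER.get(it.get("importance", "FYI"), 3)].append(it)
--     lines = ["# Jarvis Brief\n"]
--     if note:
--         lines.append(f"> {note}\n")
--     for b in buckets:
--         lines.extend(_fmt(it) for it in sorted(b, key=lambda x: x.get("account", "")))
--     return "\n".join(lines)
-- ===== Notes on version B (the rewrite author's own statement) =====
-- stated objective: alternative
-- what changed: Replaces the single composite-key sort with a one-pass distribution into four priority buckets followed by a stable per-bucket sort on account only, concatenated in priority order.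
import Mathlib
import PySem

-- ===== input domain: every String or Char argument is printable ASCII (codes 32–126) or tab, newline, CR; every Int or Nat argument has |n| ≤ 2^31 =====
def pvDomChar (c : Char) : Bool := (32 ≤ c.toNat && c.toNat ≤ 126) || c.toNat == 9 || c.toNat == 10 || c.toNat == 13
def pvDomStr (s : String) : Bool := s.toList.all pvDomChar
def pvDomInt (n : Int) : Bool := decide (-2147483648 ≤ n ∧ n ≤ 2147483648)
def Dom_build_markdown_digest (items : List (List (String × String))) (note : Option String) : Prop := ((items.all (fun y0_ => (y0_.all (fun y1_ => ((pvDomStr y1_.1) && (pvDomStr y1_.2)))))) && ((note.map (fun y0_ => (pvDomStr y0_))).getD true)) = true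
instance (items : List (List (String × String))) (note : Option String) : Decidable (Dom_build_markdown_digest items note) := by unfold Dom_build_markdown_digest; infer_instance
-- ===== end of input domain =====

-- B replaces the single composite-key sort by a one-pass distribution into four priority
-- buckets, a stable per-bucket sort on the account key only, and concatenation in priority
-- order; output lines are produced exactly as in A.

-- shared module constant (PRIORITY_ORDER of the Python module) and the two key functions
def pvPRIORITY_ORDER : PySem.Dict String Int :=
  PySem.Dict.mk [("Critical", 0), ("Time-Sensitive", 1), ("FYI", 2)]

-- PRIORITY_ORDER.get(x.get("importance","FYI"), 3)
def pvPrio (it : List (String × String)) : Int :=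
  PySem.Dict.getD pvPRIORITY_ORDER (PySem.Dict.getD (PySem.Dict.mk it) "importance" "FYI") 3

-- x.get("account","")
def pvAcc (it : List (String × String)) : String := PySem.Dict.getD (PySem.Dict.mk it) "account" ""

-- ===== PORT A =====
-- under Pre_ the keys 'account'/'importance'/'url' are present, so it['k'] = getD it "k" ""
def build_markdown_digest (items : List (List (String × String))) (note : Option String) : String :=
  if items = [] ∧ note.getD "" = "" then
    "# Jarvis Brief\n\nNo new posts from tracked accounts in the last 24h."
  else
    let lines : List String := ["# Jarvis Brief\n"]
    let lines := if note.getD "" ≠ "" then lines ++ ["> " ++ note.getD "" ++ "\n"] else lines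
    let lines := (PySem.List.sorted2 items pvPrio pvAcc).foldl
      (fun acc it =>
        let line := "- @" ++ PySem.Dict.getD (PySem.Dict.mk it) "account" "" ++ " [" ++
          PySem.Dict.getD (PySem.Dict.mk it) "importance" "" ++ "] " ++ PySem.Dict.getD (PySem.Dict.mk it) "url" ""
        let line := if PySem.Dict.getD (PySem.Dict.mk it) "date_hint" "" ≠ "" then
            line ++ " (Date: " ++ PySem.Dict.getD (PySem.Dict.mk it) "date_hint" "" ++ ")" else line
        let line := if PySem.Dict.getD (PySem.Dict.mk it) "time_hint" "" ≠ "" then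
            line ++ " (Time: " ++ PySem.Dict.getD (PySem.Dict.mk it) "time_hint" "" ++ ")" else line
        acc ++ [line]) lines
    PySem.Str.join "\n" lines

-- ===== PORT B =====
-- _fmt(it)
def pvFmt (it : List (String × String)) : String :=
  let line := "- @" ++ PySem.Dict.getD (PySem.Dict.mk it) "account" "" ++ " [" ++
    PySem.Dict.getD (PySem.Dict.mk it) "importance" "" ++ "] " ++ PySem.Dict.getD (PySem.Dict.mk it) "url" ""
  let line := if PySem.Dict.getD (PySem.Dict.mk it) "date_hint" "" ≠ "" then
      line ++ " (Date: " ++ PySem.Dict.getD (PySem.Dict.mk it) "date_hint" "" ++ ")" else line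
  let line := if PySem.Dict.getD (PySem.Dict.mk it) "time_hint" "" ≠ "" then
      line ++ " (Time: " ++ PySem.Dict.getD (PySem.Dict.mk it) "time_hint" "" ++ ")" else line
  line

def build_markdown_digest_alt (items : List (List (String × String))) (note : Option String) : String :=
  if items = [] ∧ note.getD "" = "" then
    "# Jarvis Brief\n\nNo new posts from tracked accounts in the last 24h."
  else
    let buckets := items.foldl
      (fun (b : List (List (String × String)) × List (List (String × String)) ×
               List (List (String × String)) × List (List (String × String))) it =>
        let p := pvPrio it
        if p = 0 then (b.1 ++ [it], b.2.1, b.2.2.1, b.2.2.2)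
        else if p = 1 then (b.1, b.2.1 ++ [it], b.2.2.1, b.2.2.2)
        else if p = 2 then (b.1, b.2.1, b.2.2.1 ++ [it], b.2.2.2)
        else (b.1, b.2.1, b.2.2.1, b.2.2.2 ++ [it]))
      ([], [], [], [])
    let lines : List String := ["# Jarvis Brief\n"]
    let lines := if note.getD "" ≠ "" then lines ++ ["> " ++ note.getD "" ++ "\n"] else lines
    let lines := lines
      ++ (PySem.List.sorted buckets.1 pvAcc).map pvFmt
      ++ (PySem.List.sorted buckets.2.1 pvAcc).map pvFmt
      ++ (PySem.List.sorted buckets.2.2.1 pvAcc).map pvFmt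
      ++ (PySem.List.sorted buckets.2.2.2 pvAcc).map pvFmt
    PySem.Str.join "\n" lines

-- ===== PRECONDITION & SPEC =====
-- Pre_ excludes exactly the inputs on which the Python A raises KeyError: an item missing
-- one of the mandatory keys 'account', 'importance', 'url'.
def Pre_build_markdown_digest (items : List (List (String × String))) (note : Option String) : Prop :=
  (items.all (fun it => (PySem.Dict.get? (PySem.Dict.mk it) "account").isSome &&
    (PySem.Dict.get? (PySem.Dict.mk it) "importance").isSome && (PySem.Dict.get? (PySem.Dict.mk it) "url").isSome)) = true
instance (items : List (List (String × String))) (note : Option String) : Decidable (Pre_build_markdown_digest items note) := by unfold Pre_build_markdown_digest; infer_instance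

def pvWitness_build_markdown_digest : (List (List (String × String))) × Option String :=
  ([[("account", "alice"), ("importance", "FYI"), ("url", "http://x")]], some "hi")

def Spec_build_markdown_digest (items : List (List (String × String))) (note : Option String) (out : String) : Prop := out = build_markdown_digest_alt items note
instance (items : List (List (String × String))) (note : Option String) (out : String) : Decidable (Spec_build_markdown_digest items note out) := by unfold Spec_build_markdown_digest; infer_instance

-- ===== CLAIM (what is proved, stated in full; the proofs are below) =====
def Claim_equal_build_markdown_digest : Prop := ∀ (items : List (List (String × String))) (note : Option String), Dom_build_markdown_digest items note → Pre_build_markdown_digest items note → Spec_build_markdown_digest items note (build_markdown_digest items note)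

-- ===== LEMMAS AND PROOFS =====

theorem pvInsertBy_cons {α : Type} (b : α → α → Bool) (x y : α) (l : List α) :
    PySem.List.insertBy b x (y :: l) = if b x y then x :: y :: l else y :: PySem.List.insertBy b x l := by
  simp [PySem.List.insertBy]

theorem pvInsertBy_skip {α : Type} (b : α → α → Bool) (x : α) (l m : List α)
    (h : ∀ y ∈ l, b x y = false) : PySem.List.insertBy b x (l ++ m) = l ++ PySem.List.insertBy b x m := by
  induction l with
  | nil => rfl
  | cons y l ih =>
    have hy := h y (by simp)
    simp [pvInsertBy_cons, hy, ih (fun z hz => h z (by simp [hz]))]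

theorem pvInsertBy_stop {α : Type} (b : α → α → Bool) (x : α) (l m : List α)
    (h : ∀ z ∈ m, b x z = true) : PySem.List.insertBy b x (l ++ m) = PySem.List.insertBy b x l ++ m := by
  induction l with
  | nil =>
    cases m with
    | nil => rfl
    | cons z m => simp [pvInsertBy_cons, h z (by simp), PySem.List.insertBy]
  | cons y l ih =>
    by_cases hy : b x y = true
    · simp [pvInsertBy_cons, hy]
    · simp at hy
      simp [pvInsertBy_cons, hy, ih]

theorem pvInsertBy_congr {α : Type} (b c : α → α → Bool) (x : α) (l : List α)
    (h : ∀ y ∈ l, b x y = c x y) : PySem.List.insertBy b x l = PySem.List.insertBy c x l := by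
  induction l with
  | nil => rfl
  | cons y l ih =>
    rw [pvInsertBy_cons, pvInsertBy_cons, h y (by simp), ih (fun z hz => h z (by simp [hz]))]

theorem pvSorted_snoc {α κ : Type} [LinearOrder κ] (l : List α) (x : α) (key : α → κ) :
    PySem.List.sorted (l ++ [x]) key =
      PySem.List.insertBy (fun a b => decide (key a < key b)) x (PySem.List.sorted l key) := by
  simp [PySem.List.sorted, List.foldl_append]

theorem pvSorted2_snoc {α κ₁ κ₂ : Type} [LinearOrder κ₁] [LinearOrder κ₂] (l : List α) (x : α) (k1 : α → κ₁) (k2 : α → κ₂) :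
    PySem.List.sorted2 (l ++ [x]) k1 k2 =
      PySem.List.insertBy (fun a b => decide (k1 a < k1 b) || (!decide (k1 b < k1 a) && decide (k2 a < k2 b))) x (PySem.List.sorted2 l k1 k2) := by
  simp [PySem.List.sorted2, List.foldl_append]

theorem pvMem_sorted_filter {α κ : Type} [LinearOrder κ] (xs : List α) (p : α → Bool) (key : α → κ)
    (y : α) (hy : y ∈ PySem.List.sorted (xs.filter p) key) : p y = true := by
  exact (List.mem_filter.1 ((PySem.List.mem_sorted (xs.filter p) key false y).1 hy)).2

theorem pvSorted2_eq_buckets {α : Type} (k1 : α → Int) (k2 : α → String)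
    (h4 : ∀ x, k1 x = 0 ∨ k1 x = 1 ∨ k1 x = 2 ∨ k1 x = 3) (xs : List α) :
    PySem.List.sorted2 xs k1 k2 =
      PySem.List.sorted (xs.filter (fun x => k1 x == 0)) k2
      ++ PySem.List.sorted (xs.filter (fun x => k1 x == 1)) k2
      ++ PySem.List.sorted (xs.filter (fun x => k1 x == 2)) k2
      ++ PySem.List.sorted (xs.filter (fun x => k1 x == 3)) k2 := by
  induction xs using List.reverseRecOn with
  | nil => rfl
  | append_singleton xs x ih =>
    rw [pvSorted2_snoc, ih]
    set b := fun a b => decide (k1 a < k1 b) || (!decide (k1 b < k1 a) && decide (k2 a < k2 b)) with hb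
    have hbval : ∀ y, b x y = (decide (k1 x < k1 y) || (!decide (k1 y < k1 x) && decide (k2 x < k2 y))) := fun _ => rfl
    set S0 := PySem.List.sorted (xs.filter (fun x => k1 x == 0)) k2 with hS0
    set S1 := PySem.List.sorted (xs.filter (fun x => k1 x == 1)) k2 with hS1
    set S2 := PySem.List.sorted (xs.filter (fun x => k1 x == 2)) k2 with hS2
    set S3 := PySem.List.sorted (xs.filter (fun x => k1 x == 3)) k2 with hS3
    have m0 : ∀ y ∈ S0, k1 y = 0 := fun y hy => by simpa using pvMem_sorted_filter xs _ k2 y hy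
    have m1 : ∀ y ∈ S1, k1 y = 1 := fun y hy => by simpa using pvMem_sorted_filter xs _ k2 y hy
    have m2 : ∀ y ∈ S2, k1 y = 2 := fun y hy => by simpa using pvMem_sorted_filter xs _ k2 y hy
    have m3 : ∀ y ∈ S3, k1 y = 3 := fun y hy => by simpa using pvMem_sorted_filter xs _ k2 y hy
    rcases h4 x with hx | hx | hx | hx
    · -- k1 x = 0 : insert at front region S0
      have hstop : ∀ z ∈ S1 ++ S2 ++ S3, b x z = true := by
        intro z hz
        rw [hbval]
        simp only [List.append_assoc, List.mem_append] at hz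
        rcases hz with h | h | h
        · simp [m1 z h, hx]
        · simp [m2 z h, hx]
        · simp [m3 z h, hx]
      have hcongr : ∀ y ∈ S0, b x y = (fun a c => decide (k2 a < k2 c)) x y := by
        intro y hy; rw [hbval]; simp [m0 y hy, hx]
      rw [show S0 ++ S1 ++ S2 ++ S3 = S0 ++ (S1 ++ S2 ++ S3) by simp,
          pvInsertBy_stop b x S0 _ hstop, pvInsertBy_congr b (fun a c => decide (k2 a < k2 c)) x _ hcongr]
      have f0 : (xs ++ [x]).filter (fun y => k1 y == 0) = xs.filter (fun y => k1 y == 0) ++ [x] := by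
        simp [List.filter_append, hx]
      have f1 : (xs ++ [x]).filter (fun y => k1 y == 1) = xs.filter (fun y => k1 y == 1)  := by
        simp [List.filter_append, hx]
      have f2 : (xs ++ [x]).filter (fun y => k1 y == 2) = xs.filter (fun y => k1 y == 2)  := by
        simp [List.filter_append, hx]
      have f3 : (xs ++ [x]).filter (fun y => k1 y == 3) = xs.filter (fun y => k1 y == 3)  := by
        simp [List.filter_append, hx]
      rw [f0, f1, f2, f3, pvSorted_snoc]
      simp [hS0, hS1, hS2, hS3, List.append_assoc]
    · -- k1 x = 1
      have hskip : ∀ y ∈ S0, b x y = false := by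
        intro y hy; rw [hbval]; simp [m0 y hy, hx]
      have hstop : ∀ z ∈ S2 ++ S3, b x z = true := by
        intro z hz; rw [hbval]
        rcases List.mem_append.1 hz with h | h
        · simp [m2 z h, hx]
        · simp [m3 z h, hx]
      have hcongr : ∀ y ∈ S1, b x y = (fun a c => decide (k2 a < k2 c)) x y := by
        intro y hy; rw [hbval]; simp [m1 y hy, hx]
      rw [show S0 ++ S1 ++ S2 ++ S3 = S0 ++ (S1 ++ (S2 ++ S3)) by simp,
          pvInsertBy_skip b x S0 _ hskip,
          pvInsertBy_stop b x S1 _ hstop, pvInsertBy_congr b (fun a c => decide (k2 a < k2 c)) x _ hcongr]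
      have f0 : (xs ++ [x]).filter (fun y => k1 y == 0) = xs.filter (fun y => k1 y == 0)  := by
        simp [List.filter_append, hx]
      have f1 : (xs ++ [x]).filter (fun y => k1 y == 1) = xs.filter (fun y => k1 y == 1) ++ [x] := by
        simp [List.filter_append, hx]
      have f2 : (xs ++ [x]).filter (fun y => k1 y == 2) = xs.filter (fun y => k1 y == 2)  := by
        simp [List.filter_append, hx]
      have f3 : (xs ++ [x]).filter (fun y => k1 y == 3) = xs.filter (fun y => k1 y == 3)  := by
        simp [List.filter_append, hx]
      rw [f0, f1, f2, f3, pvSorted_snoc]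
      simp [hS0, hS1, hS2, hS3, List.append_assoc]
    · -- k1 x = 2
      have hskip : ∀ y ∈ S0 ++ S1, b x y = false := by
        intro y hy; rw [hbval]
        rcases List.mem_append.1 hy with h | h
        · simp [m0 y h, hx]
        · simp [m1 y h, hx]
      have hstop : ∀ z ∈ S3, b x z = true := by
        intro z hz; rw [hbval]; simp [m3 z hz, hx]
      have hcongr : ∀ y ∈ S2, b x y = (fun a c => decide (k2 a < k2 c)) x y := by
        intro y hy; rw [hbval]; simp [m2 y hy, hx]
      rw [show S0 ++ S1 ++ S2 ++ S3 = (S0 ++ S1) ++ (S2 ++ S3) by simp,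
          pvInsertBy_skip b x (S0 ++ S1) _ hskip,
          pvInsertBy_stop b x S2 _ hstop, pvInsertBy_congr b (fun a c => decide (k2 a < k2 c)) x _ hcongr]
      have f0 : (xs ++ [x]).filter (fun y => k1 y == 0) = xs.filter (fun y => k1 y == 0)  := by
        simp [List.filter_append, hx]
      have f1 : (xs ++ [x]).filter (fun y => k1 y == 1) = xs.filter (fun y => k1 y == 1)  := by
        simp [List.filter_append, hx]
      have f2 : (xs ++ [x]).filter (fun y => k1 y == 2) = xs.filter (fun y => k1 y == 2) ++ [x] := by
        simp [List.filter_append, hx]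
      have f3 : (xs ++ [x]).filter (fun y => k1 y == 3) = xs.filter (fun y => k1 y == 3)  := by
        simp [List.filter_append, hx]
      rw [f0, f1, f2, f3, pvSorted_snoc]
      simp [hS0, hS1, hS2, hS3, List.append_assoc]
    · -- k1 x = 3
      have hskip : ∀ y ∈ S0 ++ S1 ++ S2, b x y = false := by
        intro y hy; rw [hbval]
        simp only [List.append_assoc, List.mem_append] at hy
        rcases hy with h | h | h
        · simp [m0 y h, hx]
        · simp [m1 y h, hx]
        · simp [m2 y h, hx]
      have hcongr : ∀ y ∈ S3, b x y = (fun a c => decide (k2 a < k2 c)) x y := by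
        intro y hy; rw [hbval]; simp [m3 y hy, hx]
      rw [show S0 ++ S1 ++ S2 ++ S3 = (S0 ++ S1 ++ S2) ++ S3 by simp,
          pvInsertBy_skip b x (S0 ++ S1 ++ S2) _ hskip, pvInsertBy_congr b (fun a c => decide (k2 a < k2 c)) x _ hcongr]
      have f0 : (xs ++ [x]).filter (fun y => k1 y == 0) = xs.filter (fun y => k1 y == 0) := by
        simp [List.filter_append, hx]
      have f1 : (xs ++ [x]).filter (fun y => k1 y == 1) = xs.filter (fun y => k1 y == 1) := by
        simp [List.filter_append, hx]
      have f2 : (xs ++ [x]).filter (fun y => k1 y == 2) = xs.filter (fun y => k1 y == 2) := by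
        simp [List.filter_append, hx]
      have f3 : (xs ++ [x]).filter (fun y => k1 y == 3) = xs.filter (fun y => k1 y == 3) ++ [x] := by
        simp [List.filter_append, hx]
      rw [f0, f1, f2, f3]
      rw [pvSorted_snoc]
theorem pvFold_eq_map {α : Type} (g : α → String) (l : List α) (acc : List String)
    (f : List String → α → List String) (hf : ∀ acc x, f acc x = acc ++ [g x]) :
    l.foldl f acc = acc ++ l.map g := by
  induction l generalizing acc with
  | nil => simp
  | cons x t ih => simp [hf, ih, List.append_assoc]

theorem pvFoldA (l : List (List (String × String))) (acc : List String) :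
    l.foldl
      (fun acc it =>
        let line := "- @" ++ PySem.Dict.getD (PySem.Dict.mk it) "account" "" ++ " [" ++
          PySem.Dict.getD (PySem.Dict.mk it) "importance" "" ++ "] " ++ PySem.Dict.getD (PySem.Dict.mk it) "url" ""
        let line := if PySem.Dict.getD (PySem.Dict.mk it) "date_hint" "" ≠ "" then
            line ++ " (Date: " ++ PySem.Dict.getD (PySem.Dict.mk it) "date_hint" "" ++ ")" else line
        let line := if PySem.Dict.getD (PySem.Dict.mk it) "time_hint" "" ≠ "" then
            line ++ " (Time: " ++ PySem.Dict.getD (PySem.Dict.mk it) "time_hint" "" ++ ")" else line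
        acc ++ [line]) acc = acc ++ l.map pvFmt :=
  pvFold_eq_map pvFmt l acc _ (fun _ _ => rfl)

theorem pvPrio_cases (it : List (String × String)) :
    pvPrio it = 0 ∨ pvPrio it = 1 ∨ pvPrio it = 2 ∨ pvPrio it = 3 := by
  unfold pvPrio
  set s := PySem.Dict.getD (PySem.Dict.mk it) "importance" "FYI" with hs
  by_cases h0 : s = "Critical"
  · simp [pvPRIORITY_ORDER, PySem.Dict.getD, PySem.Dict.get?_mk_cons, h0]
  · by_cases h1 : s = "Time-Sensitive"
    · simp [pvPRIORITY_ORDER, PySem.Dict.getD, PySem.Dict.get?_mk_cons, h1]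
    · by_cases h2 : s = "FYI"
      · simp [pvPRIORITY_ORDER, PySem.Dict.getD, PySem.Dict.get?_mk_cons, h2]
      · simp [pvPRIORITY_ORDER, PySem.Dict.getD, PySem.Dict.get?,
          Ne.symm h0, Ne.symm h1, Ne.symm h2]

theorem pvBuckets (items : List (List (String × String)))
    (a b c d : List (List (String × String))) :
    items.foldl
      (fun (bk : List (List (String × String)) × List (List (String × String)) ×
               List (List (String × String)) × List (List (String × String))) it =>
        let p := pvPrio it
        if p = 0 then (bk.1 ++ [it], bk.2.1, bk.2.2.1, bk.2.2.2)
        else if p = 1 then (bk.1, bk.2.1 ++ [it], bk.2.2.1, bk.2.2.2)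
        else if p = 2 then (bk.1, bk.2.1, bk.2.2.1 ++ [it], bk.2.2.2)
        else (bk.1, bk.2.1, bk.2.2.1, bk.2.2.2 ++ [it])) (a, b, c, d)
    = (a ++ items.filter (fun it => pvPrio it == 0), b ++ items.filter (fun it => pvPrio it == 1),
       c ++ items.filter (fun it => pvPrio it == 2), d ++ items.filter (fun it => pvPrio it == 3)) := by
  induction items generalizing a b c d with
  | nil => simp
  | cons it t ih =>
    simp only [List.foldl_cons]
    rcases pvPrio_cases it with h | h | h | h <;>
      simp [h, ih, List.append_assoc]

-- ===== VERDICT (by name: the statement is the Claim_ definition above) =====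
theorem build_markdown_digest_spec : Claim_equal_build_markdown_digest := by
  intro items note _ _
  unfold Spec_build_markdown_digest build_markdown_digest build_markdown_digest_alt
  by_cases h : items = [] ∧ note.getD "" = ""
  · simp [h]
  · simp only [h, if_false]
    rw [pvBuckets]
    rw [pvFoldA]
    rw [pvSorted2_eq_buckets pvPrio pvAcc pvPrio_cases]
    simp [List.map_append, List.append_assoc]
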